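-- pv_equiv track=rewrite | github.com/kushal2000/depthbasedRL | isaacsimenvs/tasks/simtoolreal/pose_viewer.py | _github_slug_from_remote
-- ===== SOURCE A (Python) =====
-- def _github_slug_from_remote(remote_url: str | None) -> str | None:
--     if not remote_url:
--         return None
--
--     remote = remote_url.strip()
--     if remote.endswith(".git"):
--         remote = remote[:-4]
--
--     prefixes = (
--         "git@github.com:",
--         "ssh://git@github.com/",
--         "https://github.com/",
--         "http://github.com/",
--     )
--     for prefix in prefixes:
--         if remote.startswith(prefix):
--             slug = remote[len(prefix):]
--             parts = slug.split("/")
--             if len(parts) >= 2: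
--                 return "/".join(parts[:2])
--     return None
-- ===== SOURCE B (Python) =====
-- import re
--
-- # One anchored regex: non-capturing alternation of the four recognised remote prefixes,
-- # then the owner and repo captured as '([^/]*)/([^/]*)' (star, not plus: empty segments
-- # are allowed, mirroring slug.split('/')[:2]).
-- _SLUG_RE = re.compile(
--     r"(?:git@github\.com:|ssh://git@github\.com/|https://github\.com/|http://github\.com/)"
--     r"([^/]*)/([^/]*)"
-- )
--
--
-- def _github_slug_from_remote(remote_url):
--     if not remote_url:
--         return None
--
--     remote = remote_url.strip()
--     if remote.endswith(".git"):
--         remote = remote[:-4]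
--
--     m = _SLUG_RE.match(remote)
--     return m.group(1) + "/" + m.group(2) if m else None
-- ===== Notes on version B (the rewrite author's own statement) =====
-- stated objective: idiomatic
-- what changed: A's explicit 4-prefix loop with split-take-2-join of the slug is replaced by one precompiled anchored regex: a non-capturing alternation of the same four prefixes followed by two possibly-empty non-slash capture groups separated by a slash, glued back with a slash on a match.
import Mathlib
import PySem

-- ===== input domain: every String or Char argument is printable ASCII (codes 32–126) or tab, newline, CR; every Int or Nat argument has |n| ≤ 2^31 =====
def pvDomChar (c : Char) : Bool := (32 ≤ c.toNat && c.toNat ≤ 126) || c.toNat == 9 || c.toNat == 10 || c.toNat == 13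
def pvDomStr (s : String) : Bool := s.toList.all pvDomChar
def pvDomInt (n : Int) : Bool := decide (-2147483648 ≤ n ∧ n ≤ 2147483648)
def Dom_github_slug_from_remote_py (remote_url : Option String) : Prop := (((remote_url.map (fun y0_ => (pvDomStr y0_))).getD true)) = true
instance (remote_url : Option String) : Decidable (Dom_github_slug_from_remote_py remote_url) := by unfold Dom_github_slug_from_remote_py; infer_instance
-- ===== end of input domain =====

-- B replaces A's explicit 4-prefix loop with split('/')[:2]/join by one anchored regex
-- (alternation of the same four prefixes, then two ([^/]*) capture groups) — objective: idiomatic.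

-- ===== PORT A =====
def pyPrefixes : List String :=
  ["git@github.com:", "ssh://git@github.com/", "https://github.com/", "http://github.com/"]

-- the 'for prefix in prefixes:' loop with its early return
def pyPrefixLoop (remote : String) : List String → Option String
  | [] => none
  | p :: ps =>
    if PySem.Str.startswith remote p then
      let slug := PySem.Str.slice remote (some (PySem.Str.len p)) none
      let parts := (PySem.Str.split? slug "/").getD []    -- sep is the literal "/", never empty, so split? is always `some`
      if 2 ≤ parts.length then some (PySem.Str.join "/" (parts.take 2))
      else pyPrefixLoop remote ps
    else pyPrefixLoop remote ps

def github_slug_from_remote_py (remote_url : Option String) : Option String :=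
  match remote_url with
  | none => none
  | some u =>
    if PySem.Str.len u = 0 then none       -- 'if not remote_url' on a non-None string
    else
      let remote := PySem.Str.strip u
      let remote := if PySem.Str.endswith remote ".git" then PySem.Str.slice remote none (some (-4)) else remote
      pyPrefixLoop remote pyPrefixes

-- ===== PORT B =====
-- Hand port of `_SLUG_RE.match(remote)` for B's specific anchored pattern (regex is not in
-- PySem): the engine tries the alternatives of the non-capturing group in order; after a
-- matching alternative, the greedy group ([^/]*) consumes up to the first '/' (it cannot
-- cross one), the literal '/' must follow — if it does not, the engine backtracks into the
-- next alternative — and group 2 consumes up to the next '/' or the end. Exact for this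
-- pattern on all inputs. The four alternatives are the same literals as pyPrefixes.
def altReTry (cs : List Char) : List String → Option String
  | [] => none
  | p :: ps =>
    if p.toList.isPrefixOf cs then
      let rest := cs.drop p.toList.length
      match rest.dropWhile (· ≠ '/') with
      | [] => altReTry cs ps      -- no '/' after group 1: this alternative fails, backtrack
      | _ :: r2 => some (String.ofList (rest.takeWhile (· ≠ '/') ++ '/' :: r2.takeWhile (· ≠ '/')))
    else altReTry cs ps

def github_slug_from_remote_py_alt (remote_url : Option String) : Option String :=
  match remote_url with
  | none => none
  | some u =>
    if PySem.Str.len u = 0 then none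
    else
      let remote := PySem.Str.strip u
      let remote := if PySem.Str.endswith remote ".git" then PySem.Str.slice remote none (some (-4)) else remote
      altReTry remote.toList pyPrefixes

-- ===== PRECONDITION & SPEC =====
def Spec_github_slug_from_remote_py (remote_url : Option String) (out : Option String) : Prop := out = github_slug_from_remote_py_alt remote_url
instance (remote_url : Option String) (out : Option String) : Decidable (Spec_github_slug_from_remote_py remote_url out) := by unfold Spec_github_slug_from_remote_py; infer_instance

-- ===== CLAIM (what is proved, stated in full; the proofs are below) =====
def Claim_equal_github_slug_from_remote_py : Prop := ∀ (remote_url : Option String), Dom_github_slug_from_remote_py remote_url → Spec_github_slug_from_remote_py remote_url (github_slug_from_remote_py remote_url)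

-- ===== LEMMAS AND PROOFS =====

-- reference shape of slug.split("/") on the char level
def spParts : List Char → List (List Char)
  | [] => [[]]
  | a :: t =>
    if a = '/' then [] :: spParts t
    else
      match spParts t with
      | [] => [[a]]
      | p :: ps => (a :: p) :: ps

theorem spParts_ne_nil (l : List Char) : spParts l ≠ [] := by
  induction l with
  | nil => simp [spParts]
  | cons a t ih =>
    simp only [spParts]
    split
    · simp
    · cases h : spParts t <;> simp

theorem splitOn_go_cons (c : Char) (rest cur : List Char) (acc : List (List Char)) (f : Nat) :
    PySem.Chars.splitOn.go ['/'] (f + 1) (c :: rest) cur acc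
      = if ['/'].isPrefixOf (c :: rest) then PySem.Chars.splitOn.go ['/'] f rest [] (cur.reverse :: acc)
        else PySem.Chars.splitOn.go ['/'] f rest (c :: cur) acc := by
  rw [PySem.Chars.splitOn.go.eq_def]; rfl

theorem splitOn_go_nil (cur : List Char) (acc : List (List Char)) (f : Nat) :
    PySem.Chars.splitOn.go ['/'] (f + 1) [] cur acc = (cur.reverse :: acc).reverse := by
  rw [PySem.Chars.splitOn.go.eq_def]

theorem splitOn_go_eq (l : List Char) : ∀ (fuel : Nat), l.length < fuel → ∀ (cur : List Char) (acc : List (List Char)),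
    PySem.Chars.splitOn.go ['/'] fuel l cur acc
      = acc.reverse ++ (match spParts l with
          | [] => [cur.reverse]
          | p :: ps => (cur.reverse ++ p) :: ps) := by
  induction l with
  | nil =>
    intro fuel hf cur acc
    cases fuel with
    | zero => omega
    | succ f => rw [splitOn_go_nil]; simp [spParts]
  | cons c rest ih =>
    intro fuel hf cur acc
    cases fuel with
    | zero => simp at hf
    | succ f =>
      rw [splitOn_go_cons]
      by_cases hc : c = '/'
      · subst hc
        rw [if_pos (by simp [List.isPrefixOf])]
        rw [ih f (by simp at hf; omega) [] (cur.reverse :: acc)]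
        simp only [spParts]
        rcases hsp : spParts rest with _ | ⟨p, ps⟩
        · exact absurd hsp (spParts_ne_nil rest)
        · simp
      · rw [if_neg (by simp [List.isPrefixOf]; exact fun hh => hc hh.symm)]
        rw [ih f (by simp at hf; omega) (c :: cur) acc]
        simp only [spParts, if_neg hc]
        rcases hsp : spParts rest with _ | ⟨p, ps⟩
        · exact absurd hsp (spParts_ne_nil rest)
        · simp

theorem splitOn_eq_spParts (l : List Char) : PySem.Chars.splitOn l ['/'] = spParts l := by
  rw [PySem.Chars.splitOn, splitOn_go_eq l (l.length + 1) (by omega) [] []]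
  rcases h : spParts l with _ | ⟨p, ps⟩
  · exact absurd h (spParts_ne_nil l)
  · simp

theorem spParts_takeWhile (l : List Char) :
    spParts l = l.takeWhile (· ≠ '/') ::
      (match l.dropWhile (· ≠ '/') with | [] => [] | _ :: r => spParts r) := by
  induction l with
  | nil => simp [spParts]
  | cons a t ih =>
    by_cases hc : a = '/'
    · subst hc; simp [spParts]
    · simp only [spParts, if_neg hc, ih, List.takeWhile_cons, List.dropWhile_cons]
      simp [hc]

-- the list A's port splits is exactly the suffix after the matched prefix
theorem slug_eq (remote p : String) (h : PySem.Str.startswith remote p = true) :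
    PySem.Str.slice remote (some (PySem.Str.len p)) none
      = String.ofList (remote.toList.drop p.toList.length) := by
  obtain ⟨sl, hsl⟩ : p.toList <+: remote.toList := by
    rw [PySem.Str.startswith_eq, PySem.Chars.startswith_iff] at h; exact h
  rw [PySem.Str.slice, PySem.Str.len_eq]
  simp only [PySem.Chars.slice_eq_listSlice]
  rw [PySem.List.slice_from _ (Int.natCast_nonneg _), Int.toNat_natCast]

-- join "/" on exactly two parts
theorem join_two (a b : List Char) :
    PySem.Str.join "/" [String.ofList a, String.ofList b] = String.ofList (a ++ '/' :: b) := by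
  simp [PySem.Str.join, PySem.Chars.join, List.intercalate]

-- A's prefix loop agrees with B's regex-alternative scan on every prefix list
theorem loop_eq_reTry (remote : String) : ∀ ps : List String,
    pyPrefixLoop remote ps = altReTry remote.toList ps := by
  intro ps
  induction ps with
  | nil => rfl
  | cons p ps ih =>
    simp only [pyPrefixLoop, altReTry]
    by_cases h : PySem.Str.startswith remote p = true
    · have hpre : p.toList <+: remote.toList := by
        rw [PySem.Str.startswith_eq, PySem.Chars.startswith_iff] at h; exact h
      rw [if_pos h, if_pos (List.isPrefixOf_iff_prefix.mpr hpre)]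
      rw [slug_eq remote p h]
      have hparts : (PySem.Str.split? (String.ofList (remote.toList.drop p.toList.length)) "/").getD []
          = (spParts (remote.toList.drop p.toList.length)).map String.ofList := by
        rw [PySem.Str.split?]
        simp [PySem.Chars.split?, splitOn_eq_spParts]
      rw [hparts]
      rw [spParts_takeWhile (remote.toList.drop p.toList.length)]
      rcases hdw : (remote.toList.drop p.toList.length).dropWhile (· ≠ '/') with _ | ⟨c, r⟩
      · simp only [List.map_cons, List.map_nil, List.length_cons, List.length_nil]
        rw [if_neg (by omega)]
        exact ih
      · have hred : (match c :: r with | [] => ([] : List (List Char)) | _ :: r' => spParts r') = spParts r := rfl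
        rw [hred, spParts_takeWhile r]
        simp only [List.map_cons, List.length_cons, List.take_succ_cons, List.take_zero]
        rw [if_pos (by omega), join_two]
    · rw [if_neg h, if_neg (by
        intro hc
        exact h (by rw [PySem.Str.startswith_eq, PySem.Chars.startswith_iff]
                    exact List.isPrefixOf_iff_prefix.mp hc))]
      exact ih

-- ===== VERDICT (by name: the statement is the Claim_ definition above) =====
theorem github_slug_from_remote_py_spec : Claim_equal_github_slug_from_remote_py := by
  intro remote_url _
  unfold Spec_github_slug_from_remote_py
  match remote_url with
  | none => rfl
  | some u =>
    simp only [github_slug_from_remote_py, github_slug_from_remote_py_alt]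
    by_cases h : PySem.Str.len u = 0
    · rw [if_pos h, if_pos h]
    · rw [if_neg h, if_neg h]
      exact loop_eq_reTry _ pyPrefixes
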